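-- pv_equiv track=rewrite | github.com/apan64/OSI_Network | datalink_layer_receive.py | splitAsterisks
-- ===== SOURCE A (Python) =====
-- def splitAsterisks(incoming):
-- 	out = []
-- 	second = []
-- 	first = incoming.split('**')
-- 	for i in first:
-- 		second += i.split('***')
-- 	for j in second:
-- 		out += j.split('****')
-- 	return out
-- ===== SOURCE B (Python) =====
-- def splitAsterisks(incoming):
-- 	# Explicit left-to-right character scan: cut a piece whenever the next two
-- 	# characters are '**' (leftmost, non-overlapping).  A's two further split
-- 	# passes on '***'/'****' are no-ops, so this single scan yields A's output.
-- 	out = []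
-- 	cur = []
-- 	i = 0
-- 	n = len(incoming)
-- 	while i < n:
-- 		if incoming[i] == '*' and i + 1 < n and incoming[i + 1] == '*':
-- 			out.append(''.join(cur))
-- 			cur = []
-- 			i += 2
-- 		else:
-- 			cur.append(incoming[i])
-- 			i += 1
-- 	out.append(''.join(cur))
-- 	return out
-- ===== Notes on version B (the rewrite author's own statement) =====
-- stated objective: alternative
-- what changed: B replaces A's three staged library-split passes (split on '**', then re-splitting every piece on '***' and '****', the latter two being no-ops) with one hand-written left-to-right character scan that cuts a piece whenever the next two characters are '**'.
import Mathlib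
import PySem

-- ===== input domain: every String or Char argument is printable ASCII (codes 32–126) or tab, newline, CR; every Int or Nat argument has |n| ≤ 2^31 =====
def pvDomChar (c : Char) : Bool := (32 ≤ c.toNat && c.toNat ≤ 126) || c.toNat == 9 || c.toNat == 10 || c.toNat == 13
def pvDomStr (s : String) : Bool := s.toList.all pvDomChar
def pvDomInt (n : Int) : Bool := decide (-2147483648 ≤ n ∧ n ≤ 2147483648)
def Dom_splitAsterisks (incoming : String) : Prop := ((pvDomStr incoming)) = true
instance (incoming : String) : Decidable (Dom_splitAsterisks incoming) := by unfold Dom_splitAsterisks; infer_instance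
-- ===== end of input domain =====

-- B replaces A's three staged split passes with one explicit character scan cutting on '**'; alternative decomposition, same cost.

-- ===== PORT A =====
-- Python str.split with a NONEMPTY literal separator never raises; PySem.Chars.splitOn is exactly that split.
def splitAsterisks (incoming : String) : List String :=
  let first := PySem.Chars.splitOn incoming.toList ['*', '*']
  let second := first.foldl (fun acc i => acc ++ PySem.Chars.splitOn i ['*', '*', '*']) []
  let out := second.foldl (fun acc j => acc ++ PySem.Chars.splitOn j ['*', '*', '*', '*']) []
  out.map String.ofList

-- ===== PORT B =====
-- Source B's while loop over the index, ported as structural recursion over the remaining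
-- characters; `cur` accumulates the current piece (kept reversed, joined at cut time).
def splitAsterisksScan : List Char → List Char → List String → List String
  | [], cur, out => out ++ [String.ofList cur.reverse]
  | '*' :: '*' :: rest', cur, out => splitAsterisksScan rest' [] (out ++ [String.ofList cur.reverse])
  | c :: rest, cur, out => splitAsterisksScan rest (c :: cur) out

def splitAsterisks_alt (incoming : String) : List String :=
  splitAsterisksScan incoming.toList [] []

-- ===== PRECONDITION & SPEC =====
def Spec_splitAsterisks (incoming : String) (out : List String) : Prop := out = splitAsterisks_alt incoming
instance (incoming : String) (out : List String) : Decidable (Spec_splitAsterisks incoming out) := by unfold Spec_splitAsterisks; infer_instance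

-- ===== CLAIM (what is proved, stated in full; the proofs are below) =====
def Claim_equal_splitAsterisks : Prop := ∀ (incoming : String), Dom_splitAsterisks incoming → Spec_splitAsterisks incoming (splitAsterisks incoming)

-- ===== LEMMAS AND PROOFS =====

-- splitOn on a string that does not contain the (nonempty) separator is the identity singleton
theorem splitOn_go_of_not_infix (sep : List Char)
    (fuel : Nat) (l cur : List Char) (acc : List (List Char))
    (hfuel : l.length < fuel) (hinf : ¬ sep <:+: l) :
    PySem.Chars.splitOn.go sep fuel l cur acc = ((cur.reverse ++ l) :: acc).reverse := by
  induction fuel generalizing l cur acc with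
  | zero => omega
  | succ fuel ih =>
    cases l with
    | nil => simp [PySem.Chars.splitOn.go]
    | cons c rest =>
      have hpre : sep.isPrefixOf (c :: rest) = false := by
        rw [Bool.eq_false_iff]
        intro h
        exact hinf (List.isPrefixOf_iff_prefix.mp h).isInfix
      simp only [PySem.Chars.splitOn.go, hpre]
      rw [ih rest (c :: cur) acc (by simpa using Nat.lt_of_succ_lt_succ hfuel)
        (fun h => hinf (h.trans (List.suffix_cons c rest).isInfix))]
      simp

theorem splitOn_of_not_infix (sep : List Char) (s : List Char)
    (hinf : ¬ sep <:+: s) : PySem.Chars.splitOn s sep = [s] := by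
  unfold PySem.Chars.splitOn
  rw [splitOn_go_of_not_infix sep _ s [] [] (by omega) hinf]
  simp

-- every piece of splitOn s sep has no occurrence of sep (sep nonempty)
theorem splitOn_go_pieces (sep : List Char) (hsep : sep ≠ [])
    (fuel : Nat) (l cur : List Char) (acc : List (List Char))
    (hfuel : l.length < fuel)
    (hcur : ∀ j, sep <+: (cur.reverse ++ l).drop j → cur.length ≤ j)
    (hacc : ∀ p ∈ acc, ¬ sep <:+: p) :
    ∀ p ∈ PySem.Chars.splitOn.go sep fuel l cur acc, ¬ sep <:+: p := by
  induction fuel generalizing l cur acc with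
  | zero => omega
  | succ fuel ih =>
    have hcurok : ¬ sep <:+: cur.reverse := by
      rintro ⟨t, u, htu⟩
      have hj : sep <+: (cur.reverse ++ l).drop t.length := by
        have : cur.reverse.drop t.length = sep ++ u := by
          rw [← htu]; simp
        refine ⟨u ++ l, ?_⟩
        rw [List.drop_append_of_le_length (by rw [← htu]; simp), this]
        simp
      have := hcur _ hj
      have hlen : t.length + sep.length + u.length = cur.length := by
        have := congrArg List.length htu; simpa [Nat.add_assoc] using this
      have : sep.length = 0 ∧ u.length = 0 := by omega
      exact hsep (List.length_eq_zero_iff.mp this.1)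
    cases l with
    | nil =>
      simp only [PySem.Chars.splitOn.go, List.reverse_cons, List.mem_append, List.mem_reverse,
        List.mem_cons]
      intro p hp
      rcases hp with hp | hp
      · exact hacc p (by simpa using hp)
      · simp at hp; subst hp; exact hcurok
    | cons c rest =>
      by_cases hpre : sep.isPrefixOf (c :: rest) = true
      · simp only [PySem.Chars.splitOn.go, hpre, if_true]
        refine ih (List.drop sep.length (c :: rest)) [] (cur.reverse :: acc) ?_ ?_ ?_
        · have : sep.length ≥ 1 := by cases sep with | nil => exact absurd rfl hsep | cons a b => simp
          have := List.length_drop (l := (c : Char) :: rest) (i := sep.length)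
          simp at hfuel ⊢; omega
        · intro j _; exact Nat.zero_le j
        · intro p hp
          rcases List.mem_cons.mp hp with hp | hp
          · subst hp; exact hcurok
          · exact hacc p hp
      · simp only [PySem.Chars.splitOn.go, hpre]
        refine ih rest (c :: cur) acc (by simp at hfuel ⊢; omega) ?_ hacc
        intro j hj
        have hsame : ((c :: cur).reverse ++ rest) = cur.reverse ++ (c :: rest) := by simp
        rw [hsame] at hj
        have h1 : cur.length ≤ j := hcur j hj
        rcases Nat.lt_or_ge cur.length j with h | h
        · simpa using h
        · exfalso
          have hje : j = cur.length := le_antisymm h h1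
          subst hje
          rw [List.drop_append_of_le_length (by simp),
            show List.drop cur.length cur.reverse = [] by simp] at hj
          exact hpre (List.isPrefixOf_iff_prefix.mpr (by simpa using hj))

theorem splitOn_pieces (sep : List Char) (hsep : sep ≠ []) (s : List Char) :
    ∀ p ∈ PySem.Chars.splitOn s sep, ¬ sep <:+: p := by
  unfold PySem.Chars.splitOn
  exact splitOn_go_pieces sep hsep _ s [] [] (by omega)
    (fun j _ => Nat.zero_le j) (by simp)

-- a foldl that appends the split of each piece, over pieces the split leaves alone, is the identity
theorem foldl_split_id (sep big : List Char) (hbig : sep <:+: big)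
    (l : List (List Char)) (h : ∀ p ∈ l, ¬ sep <:+: p) :
    l.foldl (fun acc i => acc ++ PySem.Chars.splitOn i big) [] = l := by
  have key : ∀ (init : List (List Char)),
      l.foldl (fun acc i => acc ++ PySem.Chars.splitOn i big) init = init ++ l := by
    induction l with
    | nil => simp
    | cons p t iht =>
      intro init
      have hp : ¬ big <:+: p := fun hb => h p (List.mem_cons_self) (hbig.trans hb)
      simp only [List.foldl_cons, splitOn_of_not_infix big p hp]
      rw [iht (fun q hq => h q (List.mem_cons_of_mem _ hq))]
      simp
  simpa using key []

-- splitOn.go's acc parameter is a pure accumulator (prepended, reversed, to the result)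
theorem splitOn_go_acc (sep : List Char) (fuel : Nat) (l cur : List Char)
    (acc : List (List Char)) :
    PySem.Chars.splitOn.go sep fuel l cur acc
      = acc.reverse ++ PySem.Chars.splitOn.go sep fuel l cur [] := by
  induction fuel generalizing l cur acc with
  | zero => simp [PySem.Chars.splitOn.go]
  | succ fuel ih =>
    cases l with
    | nil => simp [PySem.Chars.splitOn.go]
    | cons c rest =>
      by_cases hpre : sep.isPrefixOf (c :: rest) = true
      · simp only [PySem.Chars.splitOn.go, hpre, if_true]
        rw [ih _ [] (cur.reverse :: acc), ih _ [] [cur.reverse]]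
        simp
      · simp only [PySem.Chars.splitOn.go, hpre]
        exact ih rest (c :: cur) acc

-- the B-side scan computes the pieces of splitOn on '**'
theorem scan_eq_go (fuel : Nat) (l cur : List Char) (out : List String)
    (hfuel : l.length < fuel) :
    splitAsterisksScan l cur out
      = out ++ (PySem.Chars.splitOn.go ['*', '*'] fuel l cur []).map String.ofList := by
  induction fuel generalizing l cur out with
  | zero => omega
  | succ fuel ih =>
    cases l with
    | nil => simp [splitAsterisksScan, PySem.Chars.splitOn.go]
    | cons c rest =>
      by_cases hc : c = '*' ∧ ∃ rest', rest = '*' :: rest'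
      · obtain ⟨hc1, rest', hr⟩ := hc
        subst hc1; subst hr
        have hpre : (['*', '*'] : List Char).isPrefixOf ('*' :: '*' :: rest') = true := by
          simp [List.isPrefixOf]
        have hlt : rest'.length < fuel := by simp at hfuel; omega
        have hscan : splitAsterisksScan ('*' :: '*' :: rest') cur out
            = splitAsterisksScan rest' [] (out ++ [String.ofList cur.reverse]) := rfl
        rw [hscan, ih rest' [] _ hlt]
        simp only [PySem.Chars.splitOn.go, hpre, if_true]
        rw [splitOn_go_acc ['*', '*'] fuel _ [] [cur.reverse]]
        simp
      · have hpre : (['*', '*'] : List Char).isPrefixOf (c :: rest) = false := by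
          rw [Bool.eq_false_iff]
          intro h
          rcases List.isPrefixOf_iff_prefix.mp h with ⟨t, ht⟩
          cases rest with
          | nil => simp at ht
          | cons d rest' =>
            simp at ht
            exact hc ⟨ht.1.symm, rest', by rw [ht.2.1]⟩
        have hstep : splitAsterisksScan (c :: rest) cur out
            = splitAsterisksScan rest (c :: cur) out := by
          rw [splitAsterisksScan.eq_def]
          split <;> rename_i heq
          · simp at heq
          · cases heq
            exact absurd ⟨rfl, _, rfl⟩ hc
          · cases heq
            rfl
        rw [hstep, ih rest (c :: cur) out (by simp at hfuel ⊢; omega)]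
        simp [PySem.Chars.splitOn.go, hpre]

theorem alt_eq_splitOn (incoming : String) :
    splitAsterisks_alt incoming
      = (PySem.Chars.splitOn incoming.toList ['*', '*']).map String.ofList := by
  unfold splitAsterisks_alt PySem.Chars.splitOn
  rw [scan_eq_go (incoming.toList.length + 1) incoming.toList [] [] (by omega)]
  simp

-- ===== VERDICT (by name: the statement is the Claim_ definition above) =====
theorem splitAsterisks_spec : Claim_equal_splitAsterisks := by
  intro incoming _
  unfold Spec_splitAsterisks splitAsterisks
  rw [alt_eq_splitOn]
  have h2 : (['*', '*'] : List Char) ≠ [] := by simp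
  have hp := splitOn_pieces ['*', '*'] h2 incoming.toList
  simp only []
  rw [foldl_split_id ['*', '*'] ['*', '*', '*'] ⟨[], ['*'], rfl⟩ _ hp,
      foldl_split_id ['*', '*'] ['*', '*', '*', '*'] ⟨[], ['*', '*'], rfl⟩ _ hp]
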